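-- pv_equiv track=rewrite | github.com/fosslinux/fmt-md-table | fmt-md-table.py | strip_empty_rows
-- ===== SOURCE A (Python) =====
-- def strip_empty_rows(table):
--     index = 0
--     while index < len(table):
--         if not table[index]:
--             del table[index]
--         else:
--             index += 1
--     return table
-- ===== SOURCE B (Python) =====
-- def strip_empty_rows(table):
--     w = 0
--     for row in table:
--         if row:
--             table[w] = row
--             w += 1
--     del table[w:]
--     return table
-- ===== Notes on version B (the rewrite author's own statement) =====
-- stated objective: alternative
-- what changed: Replaced the delete-during-scan while loop (index/del with shifting) with a single forward pass using a write index that moves kept rows forward and truncates the tail once; in-place mutation and list identity are preserved.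
import Mathlib
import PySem

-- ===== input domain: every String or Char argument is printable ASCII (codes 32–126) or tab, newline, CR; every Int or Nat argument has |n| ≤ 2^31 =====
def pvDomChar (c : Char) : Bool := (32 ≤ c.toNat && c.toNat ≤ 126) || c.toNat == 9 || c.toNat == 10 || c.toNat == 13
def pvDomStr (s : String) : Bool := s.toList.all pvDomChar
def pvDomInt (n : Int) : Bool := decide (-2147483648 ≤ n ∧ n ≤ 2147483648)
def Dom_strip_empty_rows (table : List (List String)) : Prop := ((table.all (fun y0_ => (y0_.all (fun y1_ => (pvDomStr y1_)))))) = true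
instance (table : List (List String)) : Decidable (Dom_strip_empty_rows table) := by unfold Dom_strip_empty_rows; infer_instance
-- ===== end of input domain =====

-- B replaces A's delete-during-scan while loop with a single-pass write-index
-- compaction (alternative decomposition); both Pythons mutate the list in place
-- (B performs the same in-place mutation; equivalence is proved on the return value).


-- ===== PORT A =====
-- the while loop: at index `index`, delete an empty row (list shrinks) or advance
def stripLoopA (table : List (List String)) (index : Nat) : List (List String) :=
  if h : index < table.length then
    if table[index] = [] then
      stripLoopA (table.eraseIdx index) index
    else
      stripLoopA table (index + 1)
  else table
termination_by table.length - index
decreasing_by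
  · have h1 : (table.eraseIdx index).length = table.length - 1 := by
      simp [List.length_eraseIdx, h]
    omega
  · omega

def strip_empty_rows (table : List (List String)) : List (List String) :=
  stripLoopA table 0

-- ===== PORT B =====
-- one forward pass with a write index w: each truthy row is written at position w
-- (only positions already read are overwritten, so the values read are the originals),
-- then `del table[w:]` truncates the tail = take w.
def strip_empty_rows_alt (table : List (List String)) : List (List String) :=
  let st := table.foldl
    (fun (st : List (List String) × Nat) row =>
      if row ≠ [] then (st.1.set st.2 row, st.2 + 1) else st)
    (table, 0)
  st.1.take st.2

-- ===== PRECONDITION & SPEC =====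
def Spec_strip_empty_rows (table : List (List String)) (out : List (List String)) : Prop := out = strip_empty_rows_alt table
instance (table : List (List String)) (out : List (List String)) : Decidable (Spec_strip_empty_rows table out) := by unfold Spec_strip_empty_rows; infer_instance

-- ===== CLAIM (what is proved, stated in full; the proofs are below) =====
def Claim_equal_strip_empty_rows : Prop := ∀ (table : List (List String)), Dom_strip_empty_rows table → Spec_strip_empty_rows table (strip_empty_rows table)

-- ===== LEMMAS AND PROOFS =====

-- A's loop keeps the prefix before `index` and filters the rest.
theorem stripLoopA_eq (table : List (List String)) (index : Nat) :
    stripLoopA table index =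
      table.take index ++ (table.drop index).filter (fun r => r ≠ []) := by
  induction table, index using stripLoopA.induct with
  | case1 table index h hemp ih =>
      rw [stripLoopA]
      simp only [h, dif_pos, hemp, if_pos, ih]
      rw [List.eraseIdx_eq_take_drop_succ]
      have hlen : (table.take index).length = index := by
        simp [List.length_take, Nat.le_of_lt h]
      rw [List.take_append_of_le_length (by omega), List.drop_append_of_le_length (by omega)]
      simp only [List.take_take, Nat.min_self]
      rw [List.drop_eq_getElem_cons h]
      simp [hemp]
  | case2 table index h hemp ih =>
      rw [stripLoopA]
      rw [dif_pos h, if_neg hemp, ih]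
      conv_rhs => rw [List.drop_eq_getElem_cons h, List.filter_cons]
      rw [List.take_succ_eq_append_getElem h]
      rw [if_pos (by simp [hemp])]
      simp only [List.append_assoc, List.singleton_append]
  | case3 table index h =>
      rw [stripLoopA]
      have hle : table.length ≤ index := by omega
      simp [hle, List.take_of_length_le hle, List.drop_eq_nil_of_le hle]

-- B's fold invariant: with w + |rs| ≤ |tbl|, the compacted prefix is
-- tbl.take w followed by the filtered rows.
theorem foldB_eq (rs : List (List String)) (tbl : List (List String)) (w : Nat)
    (hle : w + rs.length ≤ tbl.length) :
    ((rs.foldl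
        (fun (st : List (List String) × Nat) row =>
          if row ≠ [] then (st.1.set st.2 row, st.2 + 1) else st)
        (tbl, w)).1.take
      (rs.foldl
        (fun (st : List (List String) × Nat) row =>
          if row ≠ [] then (st.1.set st.2 row, st.2 + 1) else st)
        (tbl, w)).2) = tbl.take w ++ rs.filter (fun r => r ≠ []) := by
  induction rs generalizing tbl w with
  | nil => simp
  | cons r rs ih =>
      rw [List.foldl_cons, List.filter_cons]
      by_cases hr : r = []
      · rw [if_neg (by simp [hr])]
        rw [ih tbl w (by simp at hle; omega)]
        simp [hr]
      · have hw : w < tbl.length := by simp at hle; omega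
        rw [if_pos (by simp [hr])]
        rw [ih (tbl.set w r) (w + 1) (by simp at hle ⊢; omega)]
        rw [List.take_succ_eq_append_getElem (by simpa using hw)]
        rw [List.take_set_of_le (Nat.le_refl w)]
        simp [List.getElem_set_self, hr]

-- ===== VERDICT (by name: the statement is the Claim_ definition above) =====
theorem strip_empty_rows_spec : Claim_equal_strip_empty_rows := by
  intro table _
  show strip_empty_rows table = strip_empty_rows_alt table
  rw [strip_empty_rows, stripLoopA_eq, strip_empty_rows_alt]
  rw [foldB_eq table table 0 (by omega)]
  simp
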